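-- pv_equiv track=rewrite | github.com/ramSeraph/nepal_survey_maps | parse.py | pick_farthest
-- ===== SOURCE A (Python) =====
-- def pick_farthest(corner_ips, direction):
--
--     corner_hs = [ p[0] for p in corner_ips ]
--     corner_vs = [ p[1] for p in corner_ips ]
--
--     corner_hs.sort(reverse=(direction[0]>0))
--     corner_vs.sort(reverse=(direction[1]>0))
--
--     expected = (corner_hs[0], corner_vs[1])
--     if expected in corner_ips:
--         return expected
--
--     return None
-- ===== SOURCE B (Python) =====
-- def pick_farthest(corner_ips, direction):
--     # single linear pass: running extreme h, and running first/second
--     # order-statistics of v in the requested direction (no sorting)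
--     rev_h = direction[0] > 0
--     rev_v = direction[1] > 0
--     best_h = None
--     m1 = None
--     m2 = None
--     for h, v in corner_ips:
--         if best_h is None or (h > best_h if rev_h else h < best_h):
--             best_h = h
--         if m1 is None or (v > m1 if rev_v else v < m1):
--             m1, m2 = v, m1
--         elif m2 is None or (v > m2 if rev_v else v < m2):
--             m2 = v
--     expected = (best_h, m2)
--     if expected in corner_ips:
--         return expected
--     return None
-- ===== Notes on version B (the rewrite author's own statement) =====
-- stated objective: alternative
-- what changed: Replaces the two full sorts with one linear pass that maintains the extreme h and the two leading order-statistics of v in the requested direction.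
-- crash fix: On lists with fewer than two points A raises IndexError (corner_hs[0] or corner_vs[1] out of range); B returns None there. — e.g. on pick_farthest([(3, 4)], (1, 1)): A raises IndexError, B returns none
import Mathlib
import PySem

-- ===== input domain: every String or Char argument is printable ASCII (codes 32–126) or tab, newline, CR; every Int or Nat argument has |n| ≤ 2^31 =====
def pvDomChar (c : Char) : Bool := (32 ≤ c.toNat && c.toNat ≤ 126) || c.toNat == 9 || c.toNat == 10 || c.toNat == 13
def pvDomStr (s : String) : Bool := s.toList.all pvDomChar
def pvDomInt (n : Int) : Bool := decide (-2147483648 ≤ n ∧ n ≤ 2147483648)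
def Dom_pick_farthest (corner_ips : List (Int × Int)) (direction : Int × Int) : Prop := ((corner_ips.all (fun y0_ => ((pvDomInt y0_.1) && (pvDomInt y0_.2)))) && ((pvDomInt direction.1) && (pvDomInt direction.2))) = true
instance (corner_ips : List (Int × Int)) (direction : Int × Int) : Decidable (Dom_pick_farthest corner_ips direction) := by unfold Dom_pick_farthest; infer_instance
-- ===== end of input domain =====

-- B replaces A's two sorts by one linear pass keeping the extreme h and the two
-- leading v order-statistics; equivalence of the RETURN values is proved on
-- lists with at least two points (A raises IndexError otherwise).

-- ===== PORT A =====
def pick_farthest (corner_ips : List (Int × Int)) (direction : Int × Int) : Option (Int × Int) :=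
  let corner_hs := corner_ips.map (fun p => p.1)
  let corner_vs := corner_ips.map (fun p => p.2)
  let corner_hs := PySem.List.sorted corner_hs (fun x => x) (decide (direction.1 > 0))
  let corner_vs := PySem.List.sorted corner_vs (fun x => x) (decide (direction.2 > 0))
  -- corner_hs[0] / corner_vs[1]: IndexError (= none) excluded by Pre_
  match PySem.List.pyGet? corner_hs 0, PySem.List.pyGet? corner_vs 1 with
  | some h, some v =>
      let expected := (h, v)
      if expected ∈ corner_ips then some expected else none
  | _, _ => none

-- ===== PORT B =====
-- 'v > m1 if rev else v < m1'
def pvLt (rev : Bool) (a b : Int) : Bool := if rev then b < a else a < b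

-- the 'if best_h is None or …: best_h = h' update
def pvStepH (rev : Bool) (s : Option Int) (h : Int) : Option Int :=
  match s with
  | none => some h
  | some b => if pvLt rev h b then some h else some b

-- the 'if m1 is None or …: m1, m2 = v, m1  elif m2 is None or …: m2 = v' update
def pvStepP (rev : Bool) (s : Option Int × Option Int) (v : Int) : Option Int × Option Int :=
  match s with
  | (none, _m2) => (some v, none)
  | (some a, none) => if pvLt rev v a then (some v, some a) else (some a, some v)
  | (some a, some b) =>
      if pvLt rev v a then (some v, some a)
      else if pvLt rev v b then (some a, some v)
      else (some a, some b)

def pick_farthest_alt (corner_ips : List (Int × Int)) (direction : Int × Int) : Option (Int × Int) :=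
  let rev_h := decide (direction.1 > 0)
  let rev_v := decide (direction.2 > 0)
  let st := corner_ips.foldl
    (fun (s : Option Int × Option Int × Option Int) p =>
      (pvStepH rev_h s.1 p.1, pvStepP rev_v s.2 p.2))
    (none, none, none)
  -- 'expected in corner_ips': when best_h or m2 is None, expected can never be
  -- a member of a list of int pairs, so that case returns None — exact
  match st.1 with
  | none => none
  | some h =>
    match st.2.2 with
    | none => none
    | some v => if (h, v) ∈ corner_ips then some (h, v) else none

-- ===== PRECONDITION & SPEC =====
-- A indexes corner_hs[0] and corner_vs[1]: it raises IndexError on lists with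
-- fewer than two points, so exactly those are excluded.
def Pre_pick_farthest (corner_ips : List (Int × Int)) (direction : Int × Int) : Prop :=
  2 ≤ corner_ips.length
instance (corner_ips : List (Int × Int)) (direction : Int × Int) : Decidable (Pre_pick_farthest corner_ips direction) := by unfold Pre_pick_farthest; infer_instance
def pvWitness_pick_farthest : (List (Int × Int)) × (Int × Int) := ([(0, 0), (1, 2)], (1, -1))

-- On lists with fewer than two points A raises IndexError; B returns None there.
def Raises_pick_farthest (corner_ips : List (Int × Int)) (direction : Int × Int) : Prop :=
  corner_ips.length < 2
instance (corner_ips : List (Int × Int)) (direction : Int × Int) : Decidable (Raises_pick_farthest corner_ips direction) := by unfold Raises_pick_farthest; infer_instance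
def pvRaiseWitness_pick_farthest : (List (Int × Int)) × (Int × Int) := ([(3, 4)], (1, 1))
def pvRaiseWitnessOut_pick_farthest : Option (Int × Int) := none

def Spec_pick_farthest (corner_ips : List (Int × Int)) (direction : Int × Int) (out : Option (Int × Int)) : Prop := out = pick_farthest_alt corner_ips direction
instance (corner_ips : List (Int × Int)) (direction : Int × Int) (out : Option (Int × Int)) : Decidable (Spec_pick_farthest corner_ips direction out) := by unfold Spec_pick_farthest; infer_instance

-- ===== CLAIM (what is proved, stated in full; the proofs are below) =====
def Claim_equal_pick_farthest : Prop := ∀ (corner_ips : List (Int × Int)) (direction : Int × Int), Dom_pick_farthest corner_ips direction → Pre_pick_farthest corner_ips direction → Spec_pick_farthest corner_ips direction (pick_farthest corner_ips direction)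
def Claim_raises_pick_farthest : Prop := (∀ (corner_ips : List (Int × Int)) (direction : Int × Int), Dom_pick_farthest corner_ips direction → Raises_pick_farthest corner_ips direction → ¬ Pre_pick_farthest corner_ips direction) ∧ (Dom_pick_farthest (pvRaiseWitness_pick_farthest.1) (pvRaiseWitness_pick_farthest.2) ∧ Raises_pick_farthest (pvRaiseWitness_pick_farthest.1) (pvRaiseWitness_pick_farthest.2) ∧ pick_farthest_alt (pvRaiseWitness_pick_farthest.1) (pvRaiseWitness_pick_farthest.2) = pvRaiseWitnessOut_pick_farthest)

-- ===== LEMMAS AND PROOFS =====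

-- the sorted-order relation B's strict comparisons induce: a may precede b
def pvLe (rev : Bool) (a b : Int) : Prop := pvLt rev b a = false


lemma pvLt_asymm {rev : Bool} {a b : Int} (h : pvLt rev a b = true) : pvLt rev b a = false := by
  cases rev <;> simp [pvLt] at * <;> omega

lemma pvEq {rev : Bool} {a b : Int} (h1 : pvLt rev a b = false) (h2 : pvLt rev b a = false) : a = b := by
  cases rev <;> simp [pvLt] at * <;> omega

lemma pvLe_trans {rev : Bool} {a b c : Int} (h1 : pvLe rev a b) (h2 : pvLe rev b c) : pvLe rev a c := by
  cases rev <;> simp [pvLe, pvLt] at * <;> omega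

-- insertion into a sorted list, value-level
def pvIns (rev : Bool) (v : Int) : List Int → List Int
  | [] => [v]
  | a :: t => if pvLt rev a v then a :: pvIns rev v t else v :: a :: t

lemma pvIns_perm (rev : Bool) (v : Int) (t : List Int) : (pvIns rev v t).Perm (v :: t) := by
  induction t with
  | nil => simp [pvIns]
  | cons a t ih =>
      simp only [pvIns]
      split_ifs
      · exact (ih.cons a).trans (List.Perm.swap v a t)
      · exact List.Perm.refl _

lemma pvIns_pairwise (rev : Bool) (v : Int) (t : List Int)
    (ht : t.Pairwise (pvLe rev)) : (pvIns rev v t).Pairwise (pvLe rev) := by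
  induction t with
  | nil => simp [pvIns, pvLe]
  | cons a t ih =>
      rcases List.pairwise_cons.mp ht with ⟨ha, ht'⟩
      simp only [pvIns]
      split_ifs with hav
      · refine List.pairwise_cons.mpr ⟨?_, ih ht'⟩
        intro y hy
        rcases List.mem_cons.mp ((pvIns_perm rev v t).mem_iff.mp hy) with h | h
        · subst h; exact pvLt_asymm hav
        · exact ha y h
      · refine List.pairwise_cons.mpr ⟨?_, ht⟩
        intro y hy
        rcases List.mem_cons.mp hy with h | h
        · subst h; simpa [pvLe] using hav
        · exact pvLe_trans (show pvLe rev v a by simpa [pvLe] using hav) (ha y h)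

lemma sorted_pairwise_pvLe (rev : Bool) (u : List Int) :
    (PySem.List.sorted u (fun x => x) rev).Pairwise (pvLe rev) := by
  cases rev
  · exact (PySem.List.sorted_pairwise u (fun x => x)).imp
      (by intro a b h; have h' : a ≤ b := h; simp [pvLe, pvLt]; omega)
  · exact (PySem.List.sorted_pairwise_rev u (fun x => x)).imp
      (by intro a b h; have h' : b ≤ a := h; simp [pvLe, pvLt]; omega)

lemma sorted_append_single (rev : Bool) (u : List Int) (v : Int) :
    PySem.List.sorted (u ++ [v]) (fun x => x) rev
      = pvIns rev v (PySem.List.sorted u (fun x => x) rev) := by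
  have hperm : (pvIns rev v (PySem.List.sorted u (fun x => x) rev)).Perm (u ++ [v]) :=
    (pvIns_perm rev v _).trans <|
      ((PySem.List.sorted_perm u (fun x => x) rev).cons v).trans
        ((List.perm_append_singleton v u).symm)
  have hpw : (pvIns rev v (PySem.List.sorted u (fun x => x) rev)).Pairwise (pvLe rev) :=
    pvIns_pairwise rev v _ (sorted_pairwise_pvLe rev u)
  cases rev
  · exact PySem.List.sorted_id_eq_of_perm_of_pairwise _ _ hperm
      (hpw.imp (by intro a b h; simp [pvLe, pvLt] at h; omega))
  · refine PySem.List.eq_of_perm_of_pairwise_le_of_injective (fun x : Int => -x)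
      neg_injective ?_ ?_ ?_
    · exact ((PySem.List.sorted_perm (u ++ [v]) (fun x => x) true).trans hperm.symm)
    · exact (PySem.List.sorted_pairwise_rev (u ++ [v]) (fun x => x)).imp
        (by intro a b h; show -a ≤ -b; have h' : b ≤ a := h; omega)
    · exact hpw.imp (by intro a b h; show -a ≤ -b; simp [pvLe, pvLt] at h; omega)

lemma step_pvIns (rev : Bool) (v : Int) (S : List Int) (hS : S.Pairwise (pvLe rev)) :
    pvStepP rev (S[0]?, S[1]?) v = ((pvIns rev v S)[0]?, (pvIns rev v S)[1]?) := by
  match S with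
  | [] => simp [pvStepP, pvIns]
  | [a] =>
      simp only [pvStepP, pvIns, List.getElem?_cons_zero, List.getElem?_cons_succ,
        List.getElem?_nil]
      by_cases h1 : pvLt rev v a = true
      · have h2 : pvLt rev a v = false := pvLt_asymm h1
        simp [h1, h2]
      · by_cases h2 : pvLt rev a v = true
        · simp [h1, h2]
        · have : a = v := pvEq (by simpa using h2) (by simpa using h1)
          subst this; simp [h1]
  | a :: b :: t =>
      have hab : pvLe rev a b := (List.pairwise_cons.mp hS).1 b (by simp)
      simp only [pvStepP, pvIns, List.getElem?_cons_zero, List.getElem?_cons_succ]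
      by_cases h1 : pvLt rev v a = true
      · have h2 : pvLt rev a v = false := pvLt_asymm h1
        simp [h1, h2]
      · by_cases h2 : pvLt rev a v = true
        · -- v goes strictly after a
          by_cases h3 : pvLt rev v b = true
          · have h4 : pvLt rev b v = false := pvLt_asymm h3
            simp [h1, h2, h3, h4]
          · by_cases h4 : pvLt rev b v = true
            · simp [h1, h2, h3, h4]
            · have : b = v := pvEq (by simpa using h4) (by simpa using h3)
              subst this; simp [h1, h2, h3]
        · have hva : a = v := pvEq (by simpa using h2) (by simpa using h1)
          subst hva
          by_cases h3 : pvLt rev a b = true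
          · simp [h1, h3]
          · have hba : b = a := pvEq (by simpa [pvLe] using hab) (by simpa using h3)
            subst hba; simp [h1]

lemma foldP_sorted (rev : Bool) (l : List Int) :
    l.foldl (pvStepP rev) (none, none)
      = ((PySem.List.sorted l (fun x => x) rev)[0]?,
         (PySem.List.sorted l (fun x => x) rev)[1]?) := by
  induction l using List.reverseRecOn with
  | nil => simp [PySem.List.sorted]
  | append_singleton u v ih =>
      rw [List.foldl_append, List.foldl_cons, List.foldl_nil, ih,
        sorted_append_single,
        step_pvIns rev v _ (sorted_pairwise_pvLe rev u)]

lemma fold_fst (rev : Bool) (l : List Int) (s1 : Option Int) (s2 : Option Int) :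
    (l.foldl (pvStepP rev) (s1, s2)).1 = l.foldl (pvStepH rev) s1 := by
  induction l generalizing s1 s2 with
  | nil => rfl
  | cons v t ih =>
      simp only [List.foldl_cons]
      have hstep : ∀ s2', (pvStepP rev (s1, s2') v) =
          ((pvStepH rev s1 v), (pvStepP rev (s1, s2') v).2) := by
        intro s2'
        cases s1 with
        | none => simp [pvStepP, pvStepH]
        | some a =>
            cases s2' with
            | none => simp only [pvStepP, pvStepH]; split_ifs <;> rfl
            | some b => simp only [pvStepP, pvStepH]; split_ifs <;> rfl
      rw [hstep s2]
      exact ih _ _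

lemma fold_split (rh rv : Bool) (l : List (Int × Int))
    (s1 : Option Int) (s2 : Option Int × Option Int) :
    l.foldl (fun (s : Option Int × Option Int × Option Int) p =>
        (pvStepH rh s.1 p.1, pvStepP rv s.2 p.2)) (s1, s2)
      = ((l.map (fun p => p.1)).foldl (pvStepH rh) s1,
         (l.map (fun p => p.2)).foldl (pvStepP rv) s2) := by
  induction l generalizing s1 s2 with
  | nil => rfl
  | cons p t ih => simp only [List.foldl_cons, List.map_cons]; exact ih _ _

lemma foldH_sorted (rev : Bool) (l : List Int) :
    l.foldl (pvStepH rev) none = (PySem.List.sorted l (fun x => x) rev)[0]? := by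
  rw [← fold_fst rev l none none, foldP_sorted]

lemma sorted_get0 (rev : Bool) (l : List Int) :
    PySem.List.pyGet? (PySem.List.sorted l (fun x => x) rev) 0
      = (PySem.List.sorted l (fun x => x) rev)[0]? := by
  simpa using PySem.List.pyGet?_natCast (PySem.List.sorted l (fun x => x) rev) 0

lemma sorted_get1 (rev : Bool) (l : List Int) :
    PySem.List.pyGet? (PySem.List.sorted l (fun x => x) rev) 1
      = (PySem.List.sorted l (fun x => x) rev)[1]? := by
  simpa using PySem.List.pyGet?_natCast (PySem.List.sorted l (fun x => x) rev) 1

-- ===== VERDICT (by name: the statement is the Claim_ definition above) =====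
theorem pick_farthest_spec : Claim_equal_pick_farthest := by
  intro l d _ hpre
  unfold Spec_pick_farthest pick_farthest pick_farthest_alt
  simp only [fold_split, foldH_sorted, foldP_sorted, sorted_get0, sorted_get1]
  cases (PySem.List.sorted (l.map (fun p => p.1)) (fun x => x) (decide (d.1 > 0)))[0]? <;>
    cases (PySem.List.sorted (l.map (fun p => p.2)) (fun x => x) (decide (d.2 > 0)))[1]? <;> rfl

@[simp]
theorem pick_farthest_raises : Claim_raises_pick_farthest := by
  unfold Claim_raises_pick_farthest
  constructor
  · intro l d _ hr hp
    exact absurd hp (by simp [Pre_pick_farthest, Raises_pick_farthest] at *; omega)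
  · exact ⟨by decide, by decide, by decide⟩
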